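-- pv_equiv track=rewrite | github.com/ybm911/AES | AES.py | get_matrix_of_number_hex_187221
-- ===== SOURCE A (Python) =====
-- def get_matrix_of_number_hex_187221(n):
--     # 得到输入数据对应的矩阵
--     dir = {0: [], 1: [], 2: [], 3: []}
--     length = len(n)
--     for i in range(length):
--         if(i%2==0):
--             number = int((n[i]+n[i+1]),16)
--             dir[(i/2) % 4].append(hex(number))
--     return dir
-- ===== SOURCE B (Python) =====
-- def get_matrix_of_number_hex_187221(n):
--     # parse flat, then distribute round-robin with stride-4 slices
--     byts = [hex(int(n[i] + n[i + 1], 16)) for i in range(0, len(n), 2)]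
--     return {k: byts[k::4] for k in range(4)}
-- ===== Notes on version B (the rewrite author's own statement) =====
-- stated objective: idiomatic
-- what changed: A appends into four dict buckets while scanning every index of the string and skipping odd ones; B first parses the hex pairs into one flat list in a single stride-2 comprehension and then builds the dict with stride-4 slices byts[k::4], so parsing and round-robin distribution become two separate passes with no conditional and no in-loop dict mutation.
import Mathlib
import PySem

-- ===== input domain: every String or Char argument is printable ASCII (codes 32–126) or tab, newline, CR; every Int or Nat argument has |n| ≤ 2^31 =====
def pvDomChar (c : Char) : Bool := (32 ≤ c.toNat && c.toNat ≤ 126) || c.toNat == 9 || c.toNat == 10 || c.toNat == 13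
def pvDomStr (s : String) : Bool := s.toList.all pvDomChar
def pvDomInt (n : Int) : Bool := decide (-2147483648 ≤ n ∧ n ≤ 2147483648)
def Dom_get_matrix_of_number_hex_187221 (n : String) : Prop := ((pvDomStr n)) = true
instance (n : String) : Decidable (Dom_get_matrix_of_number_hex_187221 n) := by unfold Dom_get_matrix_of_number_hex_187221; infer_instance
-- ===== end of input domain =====

-- B parses the hex pairs into one flat list first and then distributes them with stride-4 slices,
-- instead of A's single scan over every index appending into a dict; same O(n) cost, more idiomatic shape.


-- hex(z) for Python ints: "0x…"/"-0x…" with lowercase hex digits (exact; Nat.toDigits 16 gives Python's digits)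
def pvHex (z : Int) : String :=
  String.ofList ((if z < 0 then ['-', '0', 'x'] else ['0', 'x']) ++ Nat.toDigits 16 z.natAbs)

-- ===== PORT A =====
-- note: A's key (i/2) % 4 uses Python float division, but i is even so i/2 is the exact integer i//2
def get_matrix_of_number_hex_187221 (n : String) : List (Int × List String) :=
  let dir : PySem.Dict Int (List String) := PySem.Dict.ofList [(0, []), (1, []), (2, []), (3, [])]
  let cs := n.toList
  let length := PySem.List.len cs
  ((PySem.List.pyRange 0 length 1).foldl (fun d i =>
    if PySem.Int.mod i 2 == 0 then
      match PySem.Int.ofCharsBase? [PySem.List.pyGetD cs i ' ', PySem.List.pyGetD cs (i + 1) ' '] 16 with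
      | some number => d.modify (PySem.Int.mod (PySem.Int.floordiv i 2) 4) [] (fun l => l ++ [pvHex number])
      | none => d   -- int() ValueError / IndexError on n[i+1]: excluded by Pre_
    else d) dir).items

-- ===== PORT B =====
def get_matrix_of_number_hex_187221_alt (n : String) : List (Int × List String) :=
  let cs := n.toList
  let byts := (PySem.List.pyRange 0 (PySem.List.len cs) 2).map (fun i =>
    match PySem.Int.ofCharsBase? [PySem.List.pyGetD cs i ' ', PySem.List.pyGetD cs (i + 1) ' '] 16 with
    | some v => pvHex v
    | none => "")  -- int() ValueError / IndexError on n[i+1]: excluded by Pre_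
  (PySem.List.pyRange 0 4 1).map (fun k => (k, (PySem.List.slice? byts (some k) none 4).getD []))

-- ===== PRECONDITION & SPEC =====
-- Pre_ excludes exactly the inputs where A raises: odd length (IndexError on n[i+1]) or a
-- two-character chunk int(·,16) rejects (ValueError).
def pvOkPairs : List Char → Bool
  | [] => true
  | [_] => false
  | a :: b :: t => (PySem.Int.ofCharsBase? [a, b] 16).isSome && pvOkPairs t

def Pre_get_matrix_of_number_hex_187221 (n : String) : Prop := pvOkPairs n.toList = true
instance (n : String) : Decidable (Pre_get_matrix_of_number_hex_187221 n) := by unfold Pre_get_matrix_of_number_hex_187221; infer_instance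

def pvWitness_get_matrix_of_number_hex_187221 : String := "0aFf 1+2"

def Spec_get_matrix_of_number_hex_187221 (n : String) (out : List (Int × List String)) : Prop := out = get_matrix_of_number_hex_187221_alt n
instance (n : String) (out : List (Int × List String)) : Decidable (Spec_get_matrix_of_number_hex_187221 n out) := by unfold Spec_get_matrix_of_number_hex_187221; infer_instance

-- ===== CLAIM (what is proved, stated in full; the proofs are below) =====
def Claim_equal_get_matrix_of_number_hex_187221 : Prop := ∀ (n : String), Dom_get_matrix_of_number_hex_187221 n → Pre_get_matrix_of_number_hex_187221 n → Spec_get_matrix_of_number_hex_187221 n (get_matrix_of_number_hex_187221 n)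

-- ===== LEMMAS AND PROOFS =====

-- every fourth element of bs starting at position r
def pvSel {α : Type} : Nat → List α → List α
  | _, [] => []
  | 0, x :: t => x :: pvSel 3 t
  | r + 1, _ :: t => pvSel r t

-- int(n[2j] + n[2j+1], 16) and hex() of it, as functions of the pair index j
def pvParse (cs : List Char) (j : Nat) : Option Int :=
  PySem.Int.ofCharsBase? [cs.getD (2 * j) ' ', cs.getD (2 * j + 1) ' '] 16

def pvH (cs : List Char) (j : Nat) : String :=
  match pvParse cs j with
  | some v => pvHex v
  | none => ""

def pvBs (cs : List Char) : List String := (List.range ((cs.length + 1) / 2)).map (pvH cs)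

theorem pvSel_nil_of_le {α : Type} : ∀ (k : Nat) (bs : List α), bs.length ≤ k → pvSel k bs = []
  | _, [], _ => rfl
  | 0, _ :: _, h => by simp at h
  | k + 1, _ :: t, h => pvSel_nil_of_le k t (by simpa using h)

theorem pvSel_eq_drop {α : Type} : ∀ (k : Nat) (bs : List α), pvSel k bs = pvSel 0 (bs.drop k)
  | 0, _ => by simp
  | _ + 1, [] => by simp [pvSel]
  | k + 1, _ :: t => by simpa [pvSel] using pvSel_eq_drop k t

theorem pvFM {α : Type} (t : List α) :
    (List.range ((t.length + 3) / 4)).filterMap (fun j => t[4 * j]?) = pvSel 0 t := by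
  induction ht : t.length using Nat.strong_induction_on generalizing t with
  | _ n ih =>
    match t with
    | [] => simp [pvSel]
    | x :: t' =>
      have hc : ((x :: t').length + 3) / 4 = ((t'.drop 3).length + 3) / 4 + 1 := by
        simp [List.length_drop]; omega
      rw [← ht, hc, List.range_succ_eq_map]
      simp only [List.filterMap_cons, List.filterMap_map]
      have h0 : (x :: t')[4 * 0]? = some x := by simp
      rw [h0]
      have hrec : (List.range (((t'.drop 3).length + 3) / 4)).filterMap
          ((fun j => (x :: t')[4 * j]?) ∘ Nat.succ) =
          (List.range (((t'.drop 3).length + 3) / 4)).filterMap (fun j => (t'.drop 3)[4 * j]?) := by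
        apply List.filterMap_congr
        intro j _
        simp only [Function.comp]
        have h4 : 4 * Nat.succ j = (3 + 4 * j) + 1 := by omega
        rw [h4, List.getElem?_drop, List.getElem?_cons_succ]
      rw [hrec, ih (t'.drop 3).length (by simp only [List.length_cons] at ht; simp [List.length_drop]; omega) _ rfl]
      simp [pvSel, pvSel_eq_drop 3 t']

-- bs[k::4] is pvSel k bs
theorem pvSlice4 {α : Type} (bs : List α) (k : Nat) (hk : k < 4) :
    PySem.List.slice? bs (some (k : Int)) none 4 = some (pvSel k bs) := by
  simp only [PySem.List.slice?, PySem.List.sliceIndices]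
  norm_num
  by_cases hle : k < bs.length
  · have hmin : min (↑k) (↑bs.length : Int) = (k : Int) := by omega
    rw [if_neg (by omega : ¬ ((k:Int) < 0)), hmin, if_pos (by exact_mod_cast hle)]
    have hcnt : (((↑bs.length - (k:Int)) + 4 - 1) / 4).toNat = ((bs.drop k).length + 3) / 4 := by
      rw [List.length_drop]
      omega
    rw [hcnt]
    have hbody : ∀ j ∈ List.range (((bs.drop k).length + 3) / 4),
        bs[((k:Int) + 4 * (j:Int)).toNat]? = (bs.drop k)[4 * j]? := by
      intro j _
      rw [show ((k:Int) + 4 * (j:Int)).toNat = k + 4 * j by omega, List.getElem?_drop]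
    rw [List.filterMap_congr hbody, pvFM, ← pvSel_eq_drop]
  · have hmin : min (↑k) (↑bs.length : Int) = (bs.length : Int) := by omega
    rw [if_neg (by omega : ¬ ((k:Int) < 0)), hmin, if_neg (by omega)]
    simp [pvSel_nil_of_le k bs (by omega)]

theorem pvSlice4' {α : Type} (bs : List α) (k : Int) (hk0 : 0 ≤ k) (hk : k < 4) :
    PySem.List.slice? bs (some k) none 4 = some (pvSel k.toNat bs) := by
  rw [show k = ((k.toNat : Nat) : Int) by omega] at *
  exact pvSlice4 bs k.toNat (by omega)

theorem pvEvens : ∀ (n : Nat), (List.range n).filter (fun j => j % 2 == 0) =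
    (List.range ((n + 1) / 2)).map (fun j => 2 * j) := by
  intro n
  induction n with
  | zero => simp
  | succ m ih =>
    rw [List.range_succ, List.filter_append, ih]
    by_cases hm : m % 2 = 0
    · have h2 : (m + 1 + 1) / 2 = (m + 1) / 2 + 1 := by omega
      rw [h2, List.range_succ, List.map_append]
      simp [hm]
      omega
    · have h2 : (m + 1 + 1) / 2 = (m + 1) / 2 := by omega
      rw [h2]
      simp [hm]

-- filtering the round-robin-keyed pairs on key k keeps every fourth value starting at k
theorem pvCore {α : Type} (h : Nat → α) (k : Nat) :
    ∀ (m s r : Nat), r < 4 → (s + r) % 4 = k →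
    ((((List.range m).map (fun j => ((((s + j) % 4 : Nat) : Int), h (s + j)))).filter
        (fun p => p.1 == ((k : Nat) : Int))).map Prod.snd)
      = pvSel r ((List.range m).map (fun j => h (s + j))) := by
  intro m
  induction m with
  | zero => intro s r _ _; simp [pvSel]
  | succ m ih =>
    intro s r hr hsk
    rw [List.range_succ_eq_map]
    simp only [List.map_cons, List.map_map]
    have hcomp1 : ((fun j => ((((s + j) % 4 : Nat) : Int), h (s + j))) ∘ Nat.succ)
        = (fun j => ((((s + 1 + j) % 4 : Nat) : Int), h (s + 1 + j))) := by
      funext j; simp [Function.comp]; constructor <;> congr 1 <;> omega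
    have hcomp2 : ((fun j => h (s + j)) ∘ Nat.succ) = (fun j => h (s + 1 + j)) := by
      funext j; simp [Function.comp]; congr 1; omega
    rw [hcomp1, hcomp2]
    by_cases h0 : r = 0
    · subst h0
      simp only [List.filter_cons]
      rw [if_pos (by simpa using by omega)]
      simp only [List.map_cons]
      rw [ih (s + 1) 3 (by omega) (by omega)]
      simp [pvSel]
    · simp only [List.filter_cons]
      rw [if_neg (by simpa using by omega)]
      rw [ih (s + 1) (r - 1) (by omega) (by omega)]
      match r, h0 with
      | r' + 1, _ => simp [pvSel]

theorem pvUpdate_of_subset {α : Type} [BEq α] : ∀ (l : List α) (s : PySem.Set α),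
    (∀ x ∈ l, PySem.Set.contains s x = true) → PySem.Set.update s l = s
  | [], s, _ => rfl
  | x :: t, s, h => by
    have hx' : List.contains s x = true := h x (by simp)
    have : PySem.Set.add s x = s := by simp [PySem.Set.add, PySem.Set.contains, hx']
    rw [PySem.Set.update, List.foldl_cons, this]
    exact pvUpdate_of_subset t s (fun y hy => h y (by simp [hy]))

theorem pvItems4 (d : PySem.Dict Int (List String)) (h : d.keys = [0, 1, 2, 3]) :
    d.items = [(0, d.getD 0 []), (1, d.getD 1 []), (2, d.getD 2 []), (3, d.getD 3 [])] := by
  match d with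
  | .mk l =>
    have hk : l.map Prod.fst = [0, 1, 2, 3] := h
    match l, hk with
    | [(a0, v0), (a1, v1), (a2, v2), (a3, v3)], hk =>
      simp at hk
      obtain ⟨h0, h1, h2, h3⟩ := hk
      subst h0 h1 h2 h3
      simp [PySem.Dict.getD, PySem.Dict.get?]

theorem pvOk_even : ∀ (cs : List Char), pvOkPairs cs = true → cs.length % 2 = 0
  | [], _ => rfl
  | [_], h => by simp [pvOkPairs] at h
  | _ :: _ :: t, h => by
    have := pvOk_even t (by simpa [pvOkPairs] using (Bool.and_eq_true _ _ ▸ h).2)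
    simp [List.length_cons]
    omega

theorem pvOk_parse : ∀ (cs : List Char), pvOkPairs cs = true →
    ∀ j, 2 * j < cs.length → (pvParse cs j).isSome = true
  | [], _, j, hj => by simp at hj
  | [_], h, _, _ => by simp [pvOkPairs] at h
  | a :: b :: t, h, j, hj => by
    rw [pvOkPairs, Bool.and_eq_true] at h
    match j with
    | 0 => simpa [pvParse] using h.1
    | j + 1 =>
      have hrec := pvOk_parse t h.2 j (by simp at hj; omega)
      simpa [pvParse, show 2 * (j + 1) = (2 * j + 1) + 1 by omega,
             show 2 * (j + 1) + 1 = (2 * j + 1 + 1) + 1 by omega] using hrec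

-- B's port computes the four pvSel buckets of pvBs
theorem pvB_eq (n : String) : get_matrix_of_number_hex_187221_alt n =
    [(0, pvSel 0 (pvBs n.toList)), (1, pvSel 1 (pvBs n.toList)),
     (2, pvSel 2 (pvBs n.toList)), (3, pvSel 3 (pvBs n.toList))] := by
  simp only [get_matrix_of_number_hex_187221_alt, PySem.List.len_eq]
  have hbyts : (PySem.List.pyRange 0 (n.toList.length : Int) 2).map (fun i =>
      match PySem.Int.ofCharsBase? [PySem.List.pyGetD n.toList i ' ', PySem.List.pyGetD n.toList (i + 1) ' '] 16 with
      | some v => pvHex v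
      | none => "") = pvBs n.toList := by
    rw [PySem.List.pyRange_of_pos 0 (n.toList.length : Int) (by norm_num), List.map_map]
    rw [show (if (0:Int) < (n.toList.length : Int) then
          (((n.toList.length : Int) - 0 + 2 - 1) / 2).toNat else 0) = (n.toList.length + 1) / 2 from by
      split <;> omega]
    apply List.map_congr_left
    intro j _
    simp only [Function.comp]
    rw [show (0 : Int) + 2 * (j : Int) = ((2 * j : Nat) : Int) by push_cast; ring]
    rw [show ((2 * j : Nat) : Int) + 1 = ((2 * j + 1 : Nat) : Int) by push_cast; ring]
    simp only [PySem.List.pyGetD_natCast]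
    rfl
  rw [hbyts]
  rw [show PySem.List.pyRange 0 4 1 = [0, 1, 2, 3] from by decide]
  simp only [List.map_cons, List.map_nil]
  rw [pvSlice4' _ 0 (by norm_num) (by norm_num), pvSlice4' _ 1 (by norm_num) (by norm_num),
      pvSlice4' _ 2 (by norm_num) (by norm_num), pvSlice4' _ 3 (by norm_num) (by norm_num)]
  rfl

-- A's port computes the same four buckets (under Pre_)
theorem pvA_eq (n : String) (hpre : pvOkPairs n.toList = true) : get_matrix_of_number_hex_187221 n =
    [(0, pvSel 0 (pvBs n.toList)), (1, pvSel 1 (pvBs n.toList)),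
     (2, pvSel 2 (pvBs n.toList)), (3, pvSel 3 (pvBs n.toList))] := by
  simp only [get_matrix_of_number_hex_187221, PySem.List.len_eq]
  rw [PySem.List.pyRange_one 0 (n.toList.length : Int),
      show ((n.toList.length : Int) - 0).toNat = n.toList.length by omega,
      List.foldl_map]
  have hbody : ∀ (d : PySem.Dict Int (List String)) (j : Nat), j ∈ List.range n.toList.length →
      (if PySem.Int.mod (0 + (j : Int)) 2 == 0 then
        match PySem.Int.ofCharsBase?
            [PySem.List.pyGetD n.toList (0 + (j : Int)) ' ', PySem.List.pyGetD n.toList (0 + (j : Int) + 1) ' '] 16 with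
        | some number => d.modify (PySem.Int.mod (PySem.Int.floordiv (0 + (j : Int)) 2) 4) [] (fun l => l ++ [pvHex number])
        | none => d
      else d)
      = (if j % 2 == 0 then
          d.modify (((j / 2 % 4 : Nat) : Int)) [] (fun l => l ++ [pvH n.toList (j / 2)])
        else d) := by
    intro d j hj
    rw [List.mem_range] at hj
    have hcond : (PySem.Int.mod (0 + (j : Int)) 2 == 0) = (j % 2 == 0) := by
      rw [show (0 : Int) + (j : Int) = ((j : Nat) : Int) by omega]
      rw [show (2 : Int) = ((2 : Nat) : Int) by norm_num, PySem.Int.mod_natCast]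
      by_cases hj2 : j % 2 = 0
      · simp [hj2]
      · simp [hj2]
        omega
    rw [hcond]
    by_cases hj2 : j % 2 = 0
    · rw [if_pos (by simpa using hj2), if_pos (by simpa using hj2)]
      have hsc : PySem.Int.ofCharsBase?
          [PySem.List.pyGetD n.toList (0 + (j : Int)) ' ', PySem.List.pyGetD n.toList (0 + (j : Int) + 1) ' '] 16
          = pvParse n.toList (j / 2) := by
        rw [show (0 : Int) + (j : Int) = ((2 * (j / 2) : Nat) : Int) by push_cast; omega]
        rw [show ((2 * (j / 2) : Nat) : Int) + 1 = ((2 * (j / 2) + 1 : Nat) : Int) by push_cast; ring]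
        simp only [PySem.List.pyGetD_natCast]
        rfl
      rw [hsc]
      have hps := pvOk_parse n.toList hpre (j / 2) (by omega)
      obtain ⟨v, hv⟩ := Option.isSome_iff_exists.mp hps
      rw [hv]
      have hkey : PySem.Int.mod (PySem.Int.floordiv (0 + (j : Int)) 2) 4 = ((j / 2 % 4 : Nat) : Int) := by
        rw [PySem.Int.floordiv_eq_ediv_of_pos (by norm_num), PySem.Int.mod_eq_emod_of_pos (by norm_num)]
        omega
      rw [hkey]
      have hval : pvH n.toList (j / 2) = pvHex v := by unfold pvH; rw [hv]
      rw [hval]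
    · rw [if_neg (by simpa using hj2), if_neg (by simpa using hj2)]
  rw [PySem.List.foldl_congr_mem _ _ _ _ hbody]
  rw [PySem.List.foldl_if_eq_foldl_filter (fun j => j % 2 == 0), pvEvens, List.foldl_map]
  have hbody2 : ∀ (d : PySem.Dict Int (List String)) (j : Nat), j ∈ List.range ((n.toList.length + 1) / 2) →
      d.modify (((2 * j / 2 % 4 : Nat) : Int)) [] (fun l => l ++ [pvH n.toList (2 * j / 2)])
      = d.modify (((j % 4 : Nat) : Int)) [] (fun l => l ++ [pvH n.toList j]) := by
    intro d j _
    rw [show 2 * j / 2 = j by omega]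
  rw [PySem.List.foldl_congr_mem _ _ _ _ hbody2]
  have hfold : (List.range ((n.toList.length + 1) / 2)).foldl
        (fun (acc : PySem.Dict Int (List String)) (x : Nat) =>
          acc.modify (((x % 4 : Nat) : Int)) [] (fun l => l ++ [pvH n.toList x]))
        (PySem.Dict.ofList [(0, []), (1, []), (2, []), (3, [])])
      = ((List.range ((n.toList.length + 1) / 2)).map
        (fun j => (((j % 4 : Nat) : Int), pvH n.toList j))).foldl
        (fun d p => d.modify p.1 [] (fun l => l ++ [p.2]))
        (PySem.Dict.ofList [(0, []), (1, []), (2, []), (3, [])]) := by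
    rw [List.foldl_map]
  rw [hfold]
  have hkeys : (((List.range ((n.toList.length + 1) / 2)).map
        (fun j => (((j % 4 : Nat) : Int), pvH n.toList j))).foldl
        (fun d p => d.modify p.1 [] (fun l => l ++ [p.2]))
        (PySem.Dict.ofList [(0, []), (1, []), (2, []), (3, [])])).keys = [0, 1, 2, 3] := by
    rw [PySem.Dict.keys_foldl_modify_key _ Prod.fst [] (fun d p l => l ++ [p.2]) _]
    rw [show (PySem.Dict.ofList [((0 : Int), ([] : List String)), (1, []), (2, []), (3, [])]).keys
          = [0, 1, 2, 3] from rfl]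
    rw [List.map_map]
    apply pvUpdate_of_subset
    intro x hx
    simp only [List.mem_map, Function.comp] at hx
    obtain ⟨j, _, hjx⟩ := hx
    have h4 : j % 4 = 0 ∨ j % 4 = 1 ∨ j % 4 = 2 ∨ j % 4 = 3 := by omega
    rcases h4 with h | h | h | h <;> rw [← hjx, h] <;> decide
  rw [pvItems4 _ hkeys]
  have hbucket : ∀ (k : Nat), k < 4 → (((List.range ((n.toList.length + 1) / 2)).map
        (fun j => (((j % 4 : Nat) : Int), pvH n.toList j))).foldl
        (fun d p => d.modify p.1 [] (fun l => l ++ [p.2]))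
        (PySem.Dict.ofList [(0, []), (1, []), (2, []), (3, [])])).getD ((k : Nat) : Int) []
        = pvSel k (pvBs n.toList) := by
    intro k hk
    rw [PySem.Dict.getD_foldl_modify_append]
    have hcore := pvCore (pvH n.toList) k ((n.toList.length + 1) / 2) 0 k hk (by omega)
    simp only [Nat.zero_add] at hcore
    have hpre0 : (PySem.Dict.ofList [((0 : Int), ([] : List String)), (1, []), (2, []), (3, [])]).getD
        ((k : Nat) : Int) [] = [] := by
      interval_cases k <;> rfl
    rw [hpre0, List.nil_append]
    simpa [pvBs] using hcore
  have h0 := hbucket 0 (by norm_num)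
  have h1 := hbucket 1 (by norm_num)
  have h2 := hbucket 2 (by norm_num)
  have h3 := hbucket 3 (by norm_num)
  simp only [Nat.cast_zero, Nat.cast_one, Nat.cast_ofNat] at h0 h1 h2 h3
  rw [h0, h1, h2, h3]

-- ===== VERDICT (by name: the statement is the Claim_ definition above) =====
theorem get_matrix_of_number_hex_187221_spec : Claim_equal_get_matrix_of_number_hex_187221 := by
  intro n _ hpre
  unfold Spec_get_matrix_of_number_hex_187221
  rw [pvB_eq, pvA_eq n hpre]
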